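-- pv_equiv track=rewrite | github.com/hoya9802/Algorithm-Notes | 프로그래머스/2/138476. 귤 고르기/귤 고르기.py | solution
-- ===== SOURCE A (Python) =====
-- from collections import Counter
--
-- def solution(k, tangerine):
--     lst = list()
--     tg_dict = Counter(tangerine)
--     tg_val = sorted(tg_dict.values(), reverse = True)
--     tg_key = sorted(tg_dict.keys(), reverse = True)
--
--     for i in range(len(tg_val)):
--         for j in range(tg_val[i]):
--             lst.append(tg_key[i])
--
--     return len(set(lst[:k]))
-- ===== SOURCE B (Python) =====
-- from collections import Counter
--
-- def solution(k, tangerine):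
--     # Greedy over counts sorted descending: take whole groups until k tangerines
--     # are covered; never materializes the per-tangerine list A builds.
--     remaining = k
--     groups = 0
--     for c in sorted(Counter(tangerine).values(), reverse=True):
--         if remaining <= 0:
--             break
--         remaining -= c
--         groups += 1
--     return groups
-- ===== Notes on version B (the rewrite author's own statement) =====
-- stated objective: faster
-- what changed: Instead of materializing one list entry per tangerine, slicing it and deduplicating the prefix with set(), B accumulates the descending-sorted counts greedily and counts groups until k is covered.
-- outside the precondition, e.g. on solution(-1, [1, 1, 2]): A returns 1, B returns 0
import Mathlib
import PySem

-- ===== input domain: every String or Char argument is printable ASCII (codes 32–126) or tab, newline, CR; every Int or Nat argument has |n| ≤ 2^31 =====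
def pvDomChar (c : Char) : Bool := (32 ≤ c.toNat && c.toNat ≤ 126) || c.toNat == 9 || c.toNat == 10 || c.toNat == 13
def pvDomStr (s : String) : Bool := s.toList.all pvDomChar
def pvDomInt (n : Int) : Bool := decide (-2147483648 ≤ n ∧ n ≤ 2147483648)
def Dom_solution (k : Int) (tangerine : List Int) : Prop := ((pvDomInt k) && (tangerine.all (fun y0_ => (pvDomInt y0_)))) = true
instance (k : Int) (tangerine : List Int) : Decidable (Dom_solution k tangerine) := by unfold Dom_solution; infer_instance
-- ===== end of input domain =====

-- B replaces A's materialized per-tangerine list + set-of-slice by a greedy prefix-sum over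
-- the descending-sorted counts (objective: faster — constant factor, no O(n) list is built).

-- ===== PORT A =====
def solution (k : Int) (tangerine : List Int) : Int :=
  let tg_dict := PySem.Dict.counter tangerine
  let tg_val := PySem.List.sorted tg_dict.values (fun x => x) true
  let tg_key := PySem.List.sorted tg_dict.keys (fun x => x) true
  let lst : List Int :=
    (PySem.List.pyRange 0 (tg_val.length : Int) 1).foldl (fun lst i =>
      (PySem.List.pyRange 0 (PySem.List.pyGetD tg_val i 0) 1).foldl (fun lst _j =>
        lst ++ [PySem.List.pyGetD tg_key i 0]) lst) []
  ((PySem.Set.ofList (PySem.List.slice lst none (some k))).length : Int)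

-- ===== PORT B =====
-- the for-loop of Source B with its early break, as structural recursion over the sorted counts
def solAltLoop (remaining groups : Int) : List Int → Int
  | [] => groups
  | c :: rest => if remaining ≤ 0 then groups else solAltLoop (remaining - c) (groups + 1) rest

def solution_alt (k : Int) (tangerine : List Int) : Int :=
  solAltLoop k 0 (PySem.List.sorted (PySem.Dict.counter tangerine).values (fun x => x) true)

-- ===== PRECONDITION & SPEC =====
-- Pre_ excludes only k < 0 with -k < len(tangerine), outside the problem's natural domain of a
-- nonnegative pick count: there A still returns a value via Python's negative-slice rule
-- lst[:k] (drop |k| elements from the end), an accident of its list-materializing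
-- implementation that B's greedy loop has no counterpart for (B returns 0 there); for
-- len(tangerine) <= -k both return 0 and those inputs stay inside Pre_.
def Pre_solution (k : Int) (tangerine : List Int) : Prop := 0 ≤ k ∨ (tangerine.length : Int) ≤ -k
instance (k : Int) (tangerine : List Int) : Decidable (Pre_solution k tangerine) := by unfold Pre_solution; infer_instance
def pvWitness_solution : Int × List Int := (6, [1, 3, 2, 5, 4, 5, 2, 3])
def Spec_solution (k : Int) (tangerine : List Int) (out : Int) : Prop := out = solution_alt k tangerine
instance (k : Int) (tangerine : List Int) (out : Int) : Decidable (Spec_solution k tangerine out) := by unfold Spec_solution; infer_instance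

-- ===== CLAIM (what is proved, stated in full; the proofs are below) =====
def Claim_equal_solution : Prop := ∀ (k : Int) (tangerine : List Int), Dom_solution k tangerine → Pre_solution k tangerine → Spec_solution k tangerine (solution k tangerine)

-- ===== LEMMAS AND PROOFS =====

-- pure greedy: solAltLoop with the accumulator factored out
def greedy : Int → List Int → Int
  | _, [] => 0
  | k, c :: cs => if k ≤ 0 then 0 else 1 + greedy (k - c) cs

theorem greedy_nonpos (k : Int) (cs : List Int) (h : k ≤ 0) : greedy k cs = 0 := by
  cases cs <;> simp [greedy, h]

theorem solAltLoop_eq_greedy (cs : List Int) : ∀ (r g : Int), solAltLoop r g cs = g + greedy r cs := by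
  induction cs with
  | nil => intro r g; simp [solAltLoop, greedy]
  | cons c cs ih =>
      intro r g
      simp only [solAltLoop, greedy]
      split
      · simp
      · rw [ih]; ring

-- the counts of the distinct elements of xs sum to its length
theorem sum_counts (xs : List Int) :
    ((PySem.Set.ofList xs).map (fun x => xs.count x)).sum = xs.length := by
  have h1 : (PySem.Set.ofList xs).Nodup := PySem.Set.nodup_ofList xs
  have h2 : (PySem.Set.ofList xs).toFinset = xs.toFinset := by
    ext x; simp [List.mem_toFinset, PySem.Set.mem_ofList]
  rw [← List.sum_toFinset _ h1, h2, List.sum_toFinset_count_eq_length]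

-- a Python set's size is the number of distinct elements
theorem len_ofList_eq_card (l : List Int) :
    (PySem.Set.ofList l).length = l.toFinset.card := by
  have nd : (PySem.Set.ofList l).Nodup := PySem.Set.nodup_ofList l
  have : (PySem.Set.ofList l).toFinset = l.toFinset := by
    ext x; simp [List.mem_toFinset, PySem.Set.mem_ofList]
  rw [← this, List.toFinset_card_of_nodup nd]

-- inner loop: appending x once per j in range(v) is appending replicate v.toNat x
theorem foldl_range_append (x : Int) : ∀ (m : Nat) (l0 : List Int),
    (List.range m).foldl (fun l (_ : Nat) => l ++ [x]) l0 = l0 ++ List.replicate m x := by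
  intro m
  induction m with
  | zero => intro l0; simp
  | succ m ih =>
      intro l0
      rw [List.range_succ, List.foldl_append, ih]
      simp [List.replicate_succ']

theorem inner_loop (v : Int) (x : Int) (l0 : List Int) :
    (PySem.List.pyRange 0 v 1).foldl (fun l (_ : Int) => l ++ [x]) l0 = l0 ++ List.replicate v.toNat x := by
  rw [PySem.List.pyRange_one, List.foldl_map]
  simpa using foldl_range_append x (v - 0).toNat l0

-- outer loop: the index loop builds the flatMap of replicates over the zipped lists
theorem outer_loop (ks vs : List Int) (hlen : ks.length = vs.length) :
    ∀ (m : Nat), m ≤ vs.length → ∀ (l0 : List Int),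
    (List.range m).foldl (fun l (i : Nat) =>
        l ++ List.replicate (vs.getD i 0).toNat (ks.getD i 0)) l0
      = l0 ++ ((ks.zip vs).take m).flatMap (fun p => List.replicate p.2.toNat p.1) := by
  intro m
  induction m with
  | zero => intro _ l0; simp
  | succ m ih =>
      intro hm l0
      have hm' : m ≤ vs.length := Nat.le_of_succ_le hm
      have hmv : m < vs.length := hm
      have hmk : m < ks.length := by omega
      have hz : m < (ks.zip vs).length := by simp [List.length_zip]; omega
      rw [List.range_succ, List.foldl_append, ih hm' l0]
      simp only [List.foldl_cons, List.foldl_nil]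
      rw [List.take_add_one]
      rw [List.getElem?_eq_getElem hz, List.getElem_zip]
      simp [List.getD, List.getElem?_eq_getElem hmv, List.getElem?_eq_getElem hmk]

-- the core: distinct count of the k-prefix of the materialized list = greedy group count,
-- provided the keys are distinct and every count is ≥ 1
theorem core (ks : List Int) : ∀ (vs : List Int) (k : Int),
    ks.Nodup → ks.length = vs.length → (∀ v ∈ vs, 1 ≤ v) →
    ((((ks.zip vs).flatMap (fun p => List.replicate p.2.toNat p.1)).take k.toNat).toFinset.card : Int)
      = greedy k vs := by
  induction ks with
  | nil =>
      intro vs k _ hlen _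
      have : vs = [] := by cases vs <;> simp_all
      subst this; simp [greedy]
  | cons a ks ih =>
      intro vs k hnd hlen hpos
      cases vs with
      | nil => simp at hlen
      | cons c vs =>
        have hc : 1 ≤ c := hpos c (by simp)
        have hnd' : ks.Nodup := hnd.of_cons
        have hank : a ∉ ks := by simp_all [List.nodup_cons]
        simp only [List.zip_cons_cons, List.flatMap_cons, greedy]
        by_cases hk : k ≤ 0
        · have : k.toNat = 0 := by omega
          simp [this, hk]
        · simp only [if_neg hk]
          push_neg at hk
          set F := (ks.zip vs).flatMap (fun p => List.replicate p.2.toNat p.1) with hF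
          have haF : a ∉ F := by
            intro hmem
            rw [hF] at hmem
            obtain ⟨p, hp, hrep⟩ := List.mem_flatMap.mp hmem
            have := (List.eq_of_mem_replicate hrep)
            exact hank (this ▸ List.of_mem_zip hp |>.1)
          rw [List.take_append]
          by_cases hkc : k ≤ c
          · have h1 : k.toNat ≤ c.toNat := by omega
            have h2 : k.toNat - (List.replicate c.toNat a).length = 0 := by
              simp [List.length_replicate]; omega
            rw [h2, List.take_zero, List.append_nil, List.take_replicate]
            have hmin : min k.toNat c.toNat = k.toNat := by omega
            have hk0 : k.toNat ≠ 0 := by omega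
            rw [hmin, List.toFinset_replicate_of_ne_zero hk0]
            rw [greedy_nonpos (k - c) vs (by omega)]
            simp
          · push_neg at hkc
            have h1 : c.toNat ≤ k.toNat := by omega
            rw [List.take_replicate, min_eq_right h1]
            have h2 : k.toNat - (List.replicate c.toNat a).length = (k - c).toNat := by
              simp [List.length_replicate]; omega
            rw [h2]
            have haT : a ∉ (F.take (k - c).toNat) := fun h => haF (List.mem_of_mem_take h)
            have hc0 : c.toNat ≠ 0 := by omega
            rw [List.toFinset_append, List.toFinset_replicate_of_ne_zero hc0]
            rw [Finset.singleton_union, Finset.card_insert_of_notMem (by simpa using haT)]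
            have ihh := ih vs (k - c) hnd' (by simpa using hlen) (fun v hv => hpos v (by simp [hv]))
            rw [← hF] at ihh
            push_cast
            rw [ihh]
            ring

-- ===== VERDICT (by name: the statement is the Claim_ definition above) =====
theorem solution_spec : Claim_equal_solution := by
  intro k tangerine _ hpre
  unfold Spec_solution solution solution_alt
  simp only []
  set d := PySem.Dict.counter tangerine with hd
  set vals := PySem.List.sorted d.values (fun x => x) true with hvals
  set keys := PySem.List.sorted d.keys (fun x => x) true with hkeys
  -- facts about keys and vals
  have hkeyset : d.keys = PySem.Set.ofList tangerine := PySem.Dict.keys_counter tangerine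
  have hndkeys : keys.Nodup := by
    have := PySem.List.sorted_perm d.keys (fun x : Int => x) true
    exact this.nodup_iff.mpr (hkeyset ▸ PySem.Set.nodup_ofList tangerine)
  have hlen : keys.length = vals.length := by
    rw [hkeys, hvals, PySem.List.length_sorted, PySem.List.length_sorted]
    simp [PySem.Dict.keys, PySem.Dict.values]
  have hvalseq : d.values = (PySem.Set.ofList tangerine).map (fun x => (tangerine.count x : Int)) := by
    have hitems := PySem.Dict.items_counter tangerine
    simp only [PySem.Dict.values, hd, hitems, List.map_map]
    rfl
  have hpos : ∀ v ∈ vals, 1 ≤ v := by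
    intro v hv
    have hv' : v ∈ d.values := (PySem.List.mem_sorted _ _ _ _).mp hv
    rw [hvalseq] at hv'
    obtain ⟨x, hx, hxv⟩ := List.mem_map.mp hv'
    have hxmem : x ∈ tangerine := (PySem.Set.mem_ofList _ _).mp hx
    have : 1 ≤ tangerine.count x := List.count_pos_iff.mpr hxmem
    omega
  -- A's materialized list
  have hbuild :
      (PySem.List.pyRange 0 (vals.length : Int) 1).foldl (fun lst i =>
        (PySem.List.pyRange 0 (PySem.List.pyGetD vals i 0) 1).foldl (fun lst _j =>
          lst ++ [PySem.List.pyGetD keys i 0]) lst) []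
      = (keys.zip vals).flatMap (fun p => List.replicate p.2.toNat p.1) := by
    rw [PySem.List.pyRange_one, List.foldl_map]
    have hlen0 : ((vals.length : Int) - 0).toNat = vals.length := by omega
    rw [hlen0]
    have hcong : (List.range vals.length).foldl
        (fun (x : List Int) (y : Nat) =>
          (PySem.List.pyRange 0 (PySem.List.pyGetD vals ((0:Int) + (y:Int)) 0) 1).foldl
            (fun lst _j => lst ++ [PySem.List.pyGetD keys ((0:Int) + (y:Int)) 0]) x) []
      = (List.range vals.length).foldl
        (fun (l : List Int) (i : Nat) =>
          l ++ List.replicate (vals.getD i 0).toNat (keys.getD i 0)) [] := by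
      refine PySem.List.foldl_congr_mem _ _ _ _ ?_
      intro acc x _
      rw [inner_loop]
      simp [PySem.List.pyGetD_natCast]
    rw [hcong]
    have htk : (keys.zip vals).length ≤ vals.length := by
      rw [List.length_zip, hlen]; exact min_le_right _ _
    have := outer_loop keys vals hlen vals.length (le_refl _) []
    rw [List.take_of_length_le htk] at this
    simpa using this
  by_cases hk' : (0:Int) ≤ k
  · rw [hbuild, PySem.List.slice_to _ hk', solAltLoop_eq_greedy]
    rw [len_ofList_eq_card]
    have := core keys vals k hndkeys hlen hpos
    omega
  · -- k < 0 and len(tangerine) ≤ -k: the slice is empty and the greedy loop takes no group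
    have hneg : (tangerine.length : Int) ≤ -k := by
      rcases hpre with h | h
      · exact absurd h hk'
      · exact h
    have hlst : ((keys.zip vals).flatMap (fun p => List.replicate p.2.toNat p.1)).length
        = tangerine.length := by
      rw [List.length_flatMap]
      have hmz : (keys.zip vals).map (fun p => (List.replicate p.2.toNat p.1).length)
          = vals.map Int.toNat := by
        have hsz := List.map_snd_zip (l₁ := keys) (l₂ := vals) (le_of_eq hlen.symm)
        calc (keys.zip vals).map (fun p => (List.replicate p.2.toNat p.1).length)
            = ((keys.zip vals).map Prod.snd).map Int.toNat := by
              rw [List.map_map]; simp [Function.comp_def]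
          _ = vals.map Int.toNat := by rw [hsz]
      rw [hmz]
      have hperm : (vals.map Int.toNat).Perm (d.values.map Int.toNat) :=
        (PySem.List.sorted_perm d.values (fun x : Int => x) true).map _
      rw [hperm.sum_eq, hvalseq, List.map_map]
      have : (Int.toNat ∘ fun x => (tangerine.count x : Int)) = fun x => tangerine.count x := by
        funext x; simp
      rw [this, sum_counts]
    rw [hbuild, solAltLoop_eq_greedy, greedy_nonpos k vals (by omega)]
    have hm : k = -((((-k).toNat : Nat) : Int)) := by omega
    rw [hm, PySem.List.slice_to_neg_natCast _ _ (by omega)]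
    have htake : ((keys.zip vals).flatMap (fun p => List.replicate p.2.toNat p.1)).length
        - (-k).toNat = 0 := by omega
    rw [htake, List.take_zero]
    simp [PySem.Set.ofList]
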